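-- pv_equiv track=rewrite | github.com/haydenji0731/off-target-probe-checker | otpc/otpc/track.py | convert_md2bit
-- ===== SOURCE A (Python) =====
-- def convert_md2bit(s):
--     running = ""
--     bit_s = ""
--     for c in s:
--         if c.isdigit():
--             running += c
--         else:
--             if len(running) > 0:
--                 bit_s += '1' * int(running)
--             bit_s += '0'
--             running = ""
--     if len(running) > 0:
--         bit_s += '1' * int(running)
--     return bit_s
-- ===== SOURCE B (Python) =====
-- import re
--
-- def convert_md2bit(s):
--     # tokenise into maximal digit runs and single non-digit chars, then map
--     return ''.join('1' * int(t) if t.isdigit() else '0'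
--                    for t in re.findall(r'\d+|\D', s))
-- ===== Notes on version B (the rewrite author's own statement) =====
-- stated objective: idiomatic
-- what changed: Replaces the manual running-accumulator character loop with regex tokenization into maximal digit runs and single non-digit characters, joined token-by-token.
import Mathlib
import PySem

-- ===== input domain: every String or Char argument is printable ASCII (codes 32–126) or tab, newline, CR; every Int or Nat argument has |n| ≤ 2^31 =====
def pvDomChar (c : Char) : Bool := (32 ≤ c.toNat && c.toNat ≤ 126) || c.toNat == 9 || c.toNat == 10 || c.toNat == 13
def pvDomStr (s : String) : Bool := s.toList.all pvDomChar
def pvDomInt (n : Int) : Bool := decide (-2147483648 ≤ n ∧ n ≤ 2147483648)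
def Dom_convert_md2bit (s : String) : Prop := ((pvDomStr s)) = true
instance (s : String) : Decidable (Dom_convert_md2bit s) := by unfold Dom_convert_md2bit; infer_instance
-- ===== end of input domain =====

-- B replaces A's running-accumulator character loop with tokenization into maximal
-- digit runs and single non-digit characters (idiomatic; re.findall in Python).

-- ===== PORT A =====
-- '1' * int(running): running is guarded nonempty and all-digit, so ofChars? is some; getD 0 never fires
def cmEmit (running : List Char) : List Char :=
  if running.length > 0 then PySem.List.pyRepeat ['1'] ((PySem.Int.ofChars? running).getD 0) else []

-- the for-loop of A, state (running, bit_s), plus the trailing flush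
def cmGoA : List Char → List Char → List Char → List Char
  | [], running, bit => bit ++ cmEmit running
  | c :: cs, running, bit =>
      if PySem.Chars.isdigit c then cmGoA cs (running ++ [c]) bit
      else cmGoA cs [] (bit ++ cmEmit running ++ ['0'])

def convert_md2bit (s : String) : String := String.mk (cmGoA s.toList [] [])

-- ===== PORT B =====
-- re.findall(r'\d+|\D', s): maximal digit runs and single non-digit chars, in order
def cmTokens : List Char → List (List Char)
  | [] => []
  | c :: cs =>
      if PySem.Chars.isdigit c then
        (c :: cs.takeWhile PySem.Chars.isdigit) :: cmTokens (cs.dropWhile PySem.Chars.isdigit)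
      else [c] :: cmTokens cs
termination_by l => l.length
decreasing_by
  · exact Nat.lt_succ_of_le (List.length_dropWhile_le _ _)
  · exact Nat.lt_succ_self _

-- '1' * int(t) if t.isdigit() else '0', joined over the tokens
def cmTokOut (t : List Char) : List Char :=
  if PySem.Chars.strIsdigit t then PySem.List.pyRepeat ['1'] ((PySem.Int.ofChars? t).getD 0) else ['0']

def convert_md2bit_alt (s : String) : String :=
  String.mk ((cmTokens s.toList).flatMap cmTokOut)

-- ===== PRECONDITION & SPEC =====
def Spec_convert_md2bit (s : String) (out : String) : Prop := out = convert_md2bit_alt s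
instance (s : String) (out : String) : Decidable (Spec_convert_md2bit s out) := by unfold Spec_convert_md2bit; infer_instance

-- ===== CLAIM (what is proved, stated in full; the proofs are below) =====
def Claim_equal_convert_md2bit : Prop := ∀ (s : String), Dom_convert_md2bit s → Spec_convert_md2bit s (convert_md2bit s)

-- ===== LEMMAS AND PROOFS =====

lemma cm_takeWhile_append {p : Char → Bool} {rs : List Char} (l : List Char)
    (h : rs.all p = true) : (rs ++ l).takeWhile p = rs ++ l.takeWhile p := by
  induction rs with
  | nil => simp
  | cons r rs ih =>
      simp only [List.all_cons, Bool.and_eq_true] at h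
      simp [h.1, ih h.2]

lemma cm_dropWhile_append {p : Char → Bool} {rs : List Char} (l : List Char)
    (h : rs.all p = true) : (rs ++ l).dropWhile p = l.dropWhile p := by
  induction rs with
  | nil => simp
  | cons r rs ih =>
      simp only [List.all_cons, Bool.and_eq_true] at h
      simp [h.1, ih h.2]

-- flat token output of a pure digit string is exactly the flush emission
lemma cm_tokens_digits (r : List Char) (h : r.all PySem.Chars.isdigit = true) :
    (cmTokens r).flatMap cmTokOut = cmEmit r := by
  cases r with
  | nil => simp [cmTokens, cmEmit]
  | cons c cs =>
      simp only [List.all_cons, Bool.and_eq_true] at h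
      rw [cmTokens]
      rw [if_pos h.1, List.takeWhile_eq_self_iff.mpr (by simpa using h.2),
          List.dropWhile_eq_nil_iff.mpr (by intro x hx; exact (List.all_eq_true.mp h.2) x hx)]
      simp [cmTokens, cmTokOut, cmEmit, PySem.Chars.strIsdigit, h.1, h.2]

-- loop invariant: A's loop with pending digit run `running` produces B's token output of running ++ cs
lemma cm_goA_eq (cs : List Char) : ∀ (running bit : List Char),
    running.all PySem.Chars.isdigit = true →
    cmGoA cs running bit = bit ++ (cmTokens (running ++ cs)).flatMap cmTokOut := by
  induction cs with
  | nil =>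
      intro running bit h
      simp [cmGoA, cm_tokens_digits running h]
  | cons c cs ih =>
      intro running bit h
      by_cases hd : PySem.Chars.isdigit c = true
      · rw [cmGoA, if_pos hd, ih (running ++ [c]) bit (by simp [List.all_append, h, hd]),
            List.append_assoc]
        simp
      · rw [cmGoA, if_neg hd, ih [] _ rfl]
        cases running with
        | nil => simp [cmTokens, hd, cmTokOut, PySem.Chars.strIsdigit, cmEmit]
        | cons r rs =>
            simp only [List.all_cons, Bool.and_eq_true] at h
            have h1 : (rs ++ c :: cs).takeWhile PySem.Chars.isdigit = rs := by
              rw [cm_takeWhile_append _ h.2, List.takeWhile_cons_of_neg hd]; simp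
            have h2 : (rs ++ c :: cs).dropWhile PySem.Chars.isdigit = c :: cs := by
              rw [cm_dropWhile_append _ h.2, List.dropWhile_cons_of_neg hd]
            rw [show (r :: rs) ++ c :: cs = r :: (rs ++ c :: cs) from rfl, cmTokens,
                if_pos h.1, h1, h2, cmTokens, if_neg hd]
            simp [cmTokOut, cmEmit, PySem.Chars.strIsdigit, h.1, h.2, hd]

-- ===== VERDICT (by name: the statement is the Claim_ definition above) =====
theorem convert_md2bit_spec : Claim_equal_convert_md2bit := by
  intro s _
  unfold Spec_convert_md2bit convert_md2bit convert_md2bit_alt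
  rw [cm_goA_eq s.toList [] [] rfl]
  simp
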